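-- pv_equiv track=rewrite | github.com/HRishabh95/CREDPASS | read_portal.py | process_symp_il
-- ===== SOURCE A (Python) =====
-- def process_symp_il(rows):
--     if type(rows['symp_il']) is str:
--         symp_il=[]
--         sympsi=rows['symp_il'].split("..")
--         for symps in sympsi:
--             for symp in symps.split("."):
--                 if len(symp.split())<8 and len(symp)!=0:
--                     symp_il.append(f'''{symp} are symptoms of {rows['disease_name']}''')
--         #symp_il=".".join(symp_il)
--         return symp_il
--     else:
--         return []
-- ===== SOURCE B (Python) =====
-- def process_symp_il(rows):
--     s = rows['symp_il']
--     if type(s) is not str: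
--         return []
--     out = []
--     cur = []
--     for ch in s + '.':
--         if ch == '.':
--             if cur and len(''.join(cur).split()) < 8:
--                 out.append(''.join(cur) + ' are symptoms of ' + rows['disease_name'])
--             cur = []
--         else:
--             cur.append(ch)
--     return out
-- ===== Notes on version B (the rewrite author's own statement) =====
-- stated objective: alternative
-- what changed: B replaces A's split('..')-then-split('.') nested loops over pre-built token lists by a single character-level state-machine scan of the string (accumulating the current token and flushing it at each '.'), reading 'disease_name' only when a token is emitted.
import Mathlib
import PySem

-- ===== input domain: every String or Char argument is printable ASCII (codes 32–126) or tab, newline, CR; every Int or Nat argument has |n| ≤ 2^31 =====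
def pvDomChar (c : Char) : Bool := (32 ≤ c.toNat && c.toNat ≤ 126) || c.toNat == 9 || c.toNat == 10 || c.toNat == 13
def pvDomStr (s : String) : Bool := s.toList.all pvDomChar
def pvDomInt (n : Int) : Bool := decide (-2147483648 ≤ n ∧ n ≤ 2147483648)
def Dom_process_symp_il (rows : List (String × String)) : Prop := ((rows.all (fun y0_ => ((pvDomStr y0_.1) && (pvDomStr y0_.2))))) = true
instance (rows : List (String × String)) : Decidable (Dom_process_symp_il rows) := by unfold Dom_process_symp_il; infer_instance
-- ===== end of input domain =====

-- B replaces A's nested '..'-then-'.' split loops by a single character-level state-machine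
-- scan that builds tokens and flushes them at each '.': objective 'alternative'.


-- ===== PORT A =====
-- rows is a dict; rows['symp_il'] / rows['disease_name'] raise KeyError when missing
-- (those inputs are outside Pre_). The `type(...) is str` guard is always true on the
-- typed domain (all dict values are strings), so the else-branch `return []` is the
-- missing-key placeholder here.
def process_symp_il (rows : List (String × String)) : List String :=
  match (PySem.Dict.mk rows).get? "symp_il" with
  | none => []  -- Python: KeyError (excluded by Pre_)
  | some s =>
      let d := ((PySem.Dict.mk rows).get? "disease_name").getD ""  -- KeyError when missing and a token qualifies (excluded by Pre_)
      let sympsi := (PySem.Str.split? s "..").getD []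
      sympsi.foldl (fun acc symps =>
        ((PySem.Str.split? symps ".").getD []).foldl (fun acc2 symp =>
          if decide ((PySem.Str.split₀ symp).length < 8) && (PySem.Str.len symp != 0)
          then acc2 ++ [symp ++ " are symptoms of " ++ d] else acc2) acc) []

-- ===== PORT B =====
-- a single fold over the characters of s + "." with state (out, cur); the dict lookup of
-- 'disease_name' happens, as in Source B, only when a token is emitted (KeyError when missing:
-- excluded by Pre_).
def process_symp_il_alt (rows : List (String × String)) : List String :=
  match (PySem.Dict.mk rows).get? "symp_il" with
  | none => []  -- Python: KeyError (excluded by Pre_)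
  | some s =>
      ((s ++ ".").toList.foldl (fun (st : List String × List Char) ch =>
        if ch = '.' then
          ((if st.2 ≠ [] ∧ (PySem.Str.split₀ (String.ofList st.2)).length < 8
            then st.1 ++ [String.ofList st.2 ++ " are symptoms of " ++
              ((PySem.Dict.mk rows).get? "disease_name").getD ""]
            else st.1), [])
        else (st.1, st.2 ++ [ch])) ([], [])).1

-- ===== PRECONDITION & SPEC =====
-- Pre_ is exactly the set of inputs on which A returns: 'symp_il' must be present (else
-- KeyError), and either 'disease_name' is present or no token of symp_il qualifies (A —
-- and B — raise KeyError exactly when a qualifying token is formatted with a missing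
-- 'disease_name').
def Pre_process_symp_il (rows : List (String × String)) : Prop :=
  (PySem.Dict.mk rows).contains "symp_il" = true ∧
  ((PySem.Dict.mk rows).contains "disease_name" = true ∨
    (((PySem.Str.split? (((PySem.Dict.mk rows).get? "symp_il").getD "") ".").getD []).all
      (fun t => (t == "") || decide (8 ≤ (PySem.Str.split₀ t).length))) = true)
instance (rows : List (String × String)) : Decidable (Pre_process_symp_il rows) := by
  unfold Pre_process_symp_il; infer_instance
def pvWitness_process_symp_il : (List (String × String)) :=
  [("symp_il", "itching..skin rash.nodal eruptions"), ("disease_name", "Fungal infection")]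
def Spec_process_symp_il (rows : List (String × String)) (out : List String) : Prop := out = process_symp_il_alt rows
instance (rows : List (String × String)) (out : List String) : Decidable (Spec_process_symp_il rows out) := by unfold Spec_process_symp_il; infer_instance

-- ===== CLAIM (what is proved, stated in full; the proofs are below) =====
def Claim_equal_process_symp_il : Prop := ∀ (rows : List (String × String)), Dom_process_symp_il rows → Pre_process_symp_il rows → Spec_process_symp_il rows (process_symp_il rows)

-- ===== LEMMAS AND PROOFS =====

-- structural versions of Chars.splitOn for the separators '.' and '..'
def sp1 : List Char → List (List Char)
  | [] => [[]]
  | c :: rest => if c = '.' then [] :: sp1 rest else (sp1 rest).modifyHead (c :: ·)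

def sp2 : List Char → List (List Char)
  | [] => [[]]
  | [c] => [[c]]
  | c1 :: c2 :: rest =>
      if c1 = '.' ∧ c2 = '.' then [] :: sp2 rest
      else (sp2 (c2 :: rest)).modifyHead (c1 :: ·)

theorem sp1_ne_nil (cs : List Char) : sp1 cs ≠ [] := by
  cases cs with
  | nil => simp [sp1]
  | cons c rest =>
      simp only [sp1]
      split
      · simp
      · cases h : sp1 rest with
        | nil => exact absurd h (sp1_ne_nil rest)
        | cons a t => simp

theorem sp1_dot (cs : List Char) : sp1 ('.' :: cs) = [] :: sp1 cs := by
  simp [sp1]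

theorem sp1_ne (c : Char) (cs : List Char) (h : c ≠ '.') :
    sp1 (c :: cs) = (sp1 cs).modifyHead (c :: ·) := by
  simp [sp1, h]

theorem modifyHead_id2 {A : Type} (l : List A) : l.modifyHead (fun x => x) = l := by
  cases l <;> simp

theorem go1 (fuel : Nat) : ∀ (cs cur : List Char) (acc : List (List Char)),
    cs.length < fuel →
    PySem.Chars.splitOn.go ['.'] fuel cs cur acc
      = acc.reverse ++ (sp1 cs).modifyHead (cur.reverse ++ ·) := by
  induction fuel with
  | zero => intro cs cur acc h; omega
  | succ f ih =>
      intro cs cur acc h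
      cases cs with
      | nil => simp [PySem.Chars.splitOn.go, sp1]
      | cons c rest =>
          by_cases hc : c = '.'
          · subst hc
            have hpre : List.isPrefixOf ['.'] ('.' :: rest) = true := by
              simp [List.isPrefixOf]
            rw [PySem.Chars.splitOn.go]
            simp only [hpre, if_pos]
            have hdrop : List.drop (['.'] : List Char).length ('.' :: rest) = rest := rfl
            rw [hdrop, ih rest [] _ (by simpa using Nat.lt_of_succ_lt_succ h)]
            simp [sp1, modifyHead_id2]
          · have hpre : List.isPrefixOf ['.'] (c :: rest) = false := by
              simp only [List.isPrefixOf, Bool.and_eq_false_iff, beq_eq_false_iff_ne]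
              exact Or.inl (fun hb => hc hb.symm)
            rw [PySem.Chars.splitOn.go]
            simp only [hpre]
            rw [if_neg Bool.false_ne_true]
            rw [ih rest (c :: cur) acc (by simpa using Nat.lt_of_succ_lt_succ h)]
            simp [sp1, hc, Function.comp_def]

theorem splitOn_dot (cs : List Char) : PySem.Chars.splitOn cs ['.'] = sp1 cs := by
  unfold PySem.Chars.splitOn
  rw [go1 (cs.length + 1) cs [] [] (by omega)]
  simp [modifyHead_id2]

theorem go2 (fuel : Nat) : ∀ (cs cur : List Char) (acc : List (List Char)),
    cs.length < fuel →
    PySem.Chars.splitOn.go ['.', '.'] fuel cs cur acc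
      = acc.reverse ++ (sp2 cs).modifyHead (cur.reverse ++ ·) := by
  induction fuel with
  | zero => intro cs cur acc h; omega
  | succ f ih =>
      intro cs cur acc h
      match cs with
      | [] => simp [PySem.Chars.splitOn.go, sp2]
      | [c] =>
          have hpre : List.isPrefixOf ['.', '.'] [c] = false := by
            cases hcb : (('.' : Char) == c) <;> simp [List.isPrefixOf, hcb]
          rw [PySem.Chars.splitOn.go]
          simp only [hpre]
          rw [if_neg Bool.false_ne_true]
          have hf : f ≠ 0 := by simp at h; omega
          obtain ⟨f', rfl⟩ := Nat.exists_eq_succ_of_ne_zero hf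
          simp [PySem.Chars.splitOn.go, sp2]
      | c1 :: c2 :: rest =>
          by_cases hc : c1 = '.' ∧ c2 = '.'
          · obtain ⟨hx1, hx2⟩ := hc; subst hx1; subst hx2
            have hpre : List.isPrefixOf ['.', '.'] ('.' :: '.' :: rest) = true := by
              simp [List.isPrefixOf]
            rw [PySem.Chars.splitOn.go]
            simp only [hpre, if_pos]
            have hdrop : List.drop (['.', '.'] : List Char).length ('.' :: '.' :: rest) = rest := rfl
            rw [hdrop, ih rest [] _ (by simp at h ⊢; omega)]
            simp [sp2, modifyHead_id2]
          · have hpre : List.isPrefixOf ['.', '.'] (c1 :: c2 :: rest) = false := by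
              simp only [List.isPrefixOf, Bool.and_eq_false_iff, beq_eq_false_iff_ne]
              rcases not_and_or.mp hc with h' | h'
              · exact Or.inl (fun hb => h' hb.symm)
              · exact Or.inr (Or.inl (fun hb => h' hb.symm))
            rw [PySem.Chars.splitOn.go]
            simp only [hpre]
            rw [if_neg Bool.false_ne_true]
            rw [ih (c2 :: rest) (c1 :: cur) acc (by simp at h ⊢; omega)]
            simp [sp2, hc, Function.comp_def]

theorem splitOn_dotdot (cs : List Char) : PySem.Chars.splitOn cs ['.', '.'] = sp2 cs := by
  unfold PySem.Chars.splitOn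
  rw [go2 (cs.length + 1) cs [] [] (by omega)]
  simp [modifyHead_id2]

theorem sp2_ne_nil (cs : List Char) : sp2 cs ≠ [] := by
  match cs with
  | [] => simp [sp2]
  | [c] => simp [sp2]
  | c1 :: c2 :: rest =>
      simp only [sp2]
      split
      · simp
      · cases h : sp2 (c2 :: rest) with
        | nil => exact absurd h (sp2_ne_nil (c2 :: rest))
        | cons a t => simp

theorem flat_ne_nil (cs : List Char) : (sp2 cs).flatMap sp1 ≠ [] := by
  cases h : sp2 cs with
  | nil => exact absurd h (sp2_ne_nil cs)
  | cons a t =>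
      simp only [List.flatMap_cons]
      intro hcon
      exact sp1_ne_nil a (List.append_eq_nil_iff.mp hcon).1

theorem filt_of_core {q : List Char → Bool} {xs ys : List (List Char)}
    (hx : xs ≠ []) (hy : ys ≠ [])
    (hh : xs.head? = ys.head?) (ht : xs.tail.filter q = ys.tail.filter q) :
    xs.filter q = ys.filter q := by
  cases xs with
  | nil => exact absurd rfl hx
  | cons a t =>
      cases ys with
      | nil => exact absurd rfl hy
      | cons b u =>
          simp only [List.head?_cons, Option.some.injEq] at hh
          subst hh
          simp only [List.tail_cons] at ht
          simp [List.filter_cons, ht]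

theorem core (q : List Char → Bool) (hq : q [] = false) (n : Nat) :
    ∀ cs : List Char, cs.length ≤ n →
    ((sp2 cs).flatMap sp1).head? = (sp1 cs).head? ∧
    (((sp2 cs).flatMap sp1).tail).filter q = ((sp1 cs).tail).filter q := by
  induction n with
  | zero =>
      intro cs h
      have : cs = [] := List.length_eq_zero_iff.mp (Nat.le_zero.mp h)
      subst this
      simp [sp2, sp1]
  | succ n ih =>
      intro cs h
      have full : ∀ cs' : List Char, cs'.length ≤ n →
          ((sp2 cs').flatMap sp1).filter q = (sp1 cs').filter q := by
        intro cs' h'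
        exact filt_of_core (flat_ne_nil cs') (sp1_ne_nil cs') (ih cs' h').1 (ih cs' h').2
      match cs with
      | [] => simp [sp2, sp1]
      | [c] => simp [sp2]
      | c1 :: c2 :: rest =>
          by_cases hc : c1 = '.' ∧ c2 = '.'
          · obtain ⟨hx1, hx2⟩ := hc; subst hx1; subst hx2
            have hfull := full rest (by simp at h ⊢; omega)
            have hs2 : sp2 ('.' :: '.' :: rest) = [] :: sp2 rest := by simp [sp2]
            have hs0 : sp1 ([] : List Char) = [[]] := rfl
            rw [hs2, sp1_dot, sp1_dot, List.flatMap_cons, hs0]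
            refine ⟨by simp, ?_⟩
            simp [hq, hfull]
          · simp only [sp2, if_neg hc]
            have hlen : (c2 :: rest).length ≤ n := by simp at h ⊢; omega
            obtain ⟨ihh, iht⟩ := ih (c2 :: rest) hlen
            have hfull := full (c2 :: rest) hlen
            cases h2 : sp2 (c2 :: rest) with
            | nil => exact absurd h2 (sp2_ne_nil (c2 :: rest))
            | cons a t =>
                rw [h2] at ihh iht hfull
                by_cases hc1 : c1 = '.'
                · subst hc1
                  simp only [List.modifyHead_cons, List.flatMap_cons, sp1_dot,
                    List.cons_append, List.tail_cons, List.head?_cons]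
                  exact ⟨by simp, by simpa using hfull⟩
                · cases h1 : sp1 a with
                  | nil => exact absurd h1 (sp1_ne_nil a)
                  | cons b u =>
                      cases h3 : sp1 (c2 :: rest) with
                      | nil => exact absurd h3 (sp1_ne_nil (c2 :: rest))
                      | cons b' u' =>
                          rw [h3] at ihh iht
                          simp only [List.flatMap_cons, h1, List.head?_cons,
                            List.tail_cons, List.cons_append] at ihh iht
                          have hbb : b = b' := by simpa using ihh
                          subst hbb
                          rw [List.modifyHead_cons, List.flatMap_cons,
                            sp1_ne c1 a hc1, sp1_ne c1 (c2 :: rest) hc1, h1, h3,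
                            List.modifyHead_cons, List.modifyHead_cons]
                          exact ⟨by simp, by simpa using iht⟩

theorem chars_main (q : List Char → Bool) (hq : q [] = false) (cs : List Char) :
    ((PySem.Chars.splitOn cs ['.', '.']).flatMap (fun u => PySem.Chars.splitOn u ['.'])).filter q
      = (PySem.Chars.splitOn cs ['.']).filter q := by
  simp only [splitOn_dot, splitOn_dotdot]
  exact filt_of_core (flat_ne_nil cs) (sp1_ne_nil cs)
    (core q hq cs.length cs le_rfl).1 (core q hq cs.length cs le_rfl).2

theorem str_main (p : String → Bool) (hp : p "" = false) (s : String) :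
    (((PySem.Str.split? s "..").getD []).flatMap
        (fun u => (PySem.Str.split? u ".").getD [])).filter p
      = ((PySem.Str.split? s ".").getD []).filter p := by
  have hdd : ("..".toList) = ['.', '.'] := by decide
  have hd : (".".toList) = ['.'] := by decide
  simp only [PySem.Str.split?, PySem.Chars.split?, hdd, hd]
  simp only [List.isEmpty_cons, if_neg Bool.false_ne_true, Option.map_some, Option.getD_some,
    List.flatMap_map, String.toList_ofList, List.filter_map]
  rw [← List.map_flatMap, List.filter_map]
  congr 1
  exact chars_main (fun u => p (String.ofList u)) (by simpa using hp) s.toList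

theorem pred_eq (t : String) :
    (decide ((PySem.Str.split₀ t).length < 8) && (PySem.Str.len t != 0))
      = ((t != "") && decide ((PySem.Str.split₀ t).length < 8)) := by
  by_cases h : t = ""
  · subst h; simp [PySem.Str.len]
  · have ht : t.toList ≠ [] := fun hn => h (String.toList_eq_nil_iff.mp hn)
    have h0 : t.length ≠ 0 := by
      rw [← String.length_toList]
      simpa [List.length_eq_zero_iff] using ht
    have hb1 : ((t.length : Int) != 0) = true := by
      simpa [bne_iff_ne] using Int.natCast_ne_zero.mpr h0
    have hb2 : (t != "") = true := by simpa [bne_iff_ne] using h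
    simp [PySem.Str.len, hb1, hb2]

theorem flatMap_filter (p : String → Bool) (g : String → List String) (l : List String) :
    l.flatMap (fun x => (g x).filter p) = (l.flatMap g).filter p := by
  induction l with
  | nil => simp
  | cons x xs ihx => simp [List.filter_append, ihx]

-- A reduced to a filter+map over the single '.'-split (uses str_main on the nested splits)
theorem A_reduced (rows : List (String × String)) (s : String)
    (hs : (PySem.Dict.mk rows).get? "symp_il" = some s) :
    process_symp_il rows
      = ((((PySem.Str.split? s ".").getD []).filter
            (fun t => (t != "") && decide ((PySem.Str.split₀ t).length < 8))).map
          (fun t => t ++ " are symptoms of " ++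
            ((PySem.Dict.mk rows).get? "disease_name").getD "")) := by
  unfold process_symp_il
  simp only [hs]
  set d := ((PySem.Dict.mk rows).get? "disease_name").getD "" with hdd
  rw [show (fun (acc : List String) (symps : String) =>
        ((PySem.Str.split? symps ".").getD []).foldl (fun acc2 symp =>
          if decide ((PySem.Str.split₀ symp).length < 8) && (PySem.Str.len symp != 0)
          then acc2 ++ [symp ++ " are symptoms of " ++ d] else acc2) acc)
      = fun (acc : List String) (symps : String) =>
          acc ++ (((PySem.Str.split? symps ".").getD []).filter
              (fun symp => decide ((PySem.Str.split₀ symp).length < 8) && (PySem.Str.len symp != 0))).map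
            (fun symp => symp ++ " are symptoms of " ++ d)
    from funext fun acc => funext fun symps =>
      PySem.List.foldl_append_if _ _ _ acc]
  rw [PySem.List.foldl_append_eq_flatMap, List.nil_append, ← List.map_flatMap,
    flatMap_filter, List.filter_congr (fun t _ => pred_eq t)]
  rw [str_main (fun t => (t != "") && decide ((PySem.Str.split₀ t).length < 8)) rfl s]

-- B's character scan, abstracted over the disease string
def scanStep (d : String) (st : List String × List Char) (ch : Char) : List String × List Char :=
  if ch = '.' then
    ((if st.2 ≠ [] ∧ (PySem.Str.split₀ (String.ofList st.2)).length < 8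
      then st.1 ++ [String.ofList st.2 ++ " are symptoms of " ++ d] else st.1), [])
  else (st.1, st.2 ++ [ch])

def qpred (u : List Char) : Bool :=
  decide (u ≠ [] ∧ (PySem.Str.split₀ (String.ofList u)).length < 8)

theorem scan_go (d : String) (cs : List Char) : ∀ (cur : List Char) (out : List String),
    (List.foldl (scanStep d) (out, cur) (cs ++ ['.'])).1
      = out ++ (((sp1 cs).modifyHead (cur ++ ·)).filter qpred).map
          (fun u => String.ofList u ++ " are symptoms of " ++ d) := by
  induction cs with
  | nil =>
      intro cur out
      simp only [List.nil_append, List.foldl_cons, List.foldl_nil, scanStep, reduceIte, sp1,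
        List.modifyHead_cons, List.append_nil, List.filter]
      by_cases hp : cur ≠ [] ∧ (PySem.Str.split₀ (String.ofList cur)).length < 8
      · simp [hp, qpred]
      · simp [hp, qpred]
  | cons c rest ih =>
      intro cur out
      by_cases hc : c = '.'
      · subst hc
        simp only [List.cons_append, List.foldl_cons, scanStep, reduceIte]
        rw [ih [] _]
        have hid : (sp1 rest).modifyHead (fun x => [] ++ x) = sp1 rest := by
          simp only [List.nil_append]; exact modifyHead_id2 _
        rw [hid, sp1_dot, List.modifyHead_cons, List.filter_cons]
        by_cases hp : cur ≠ [] ∧ (PySem.Str.split₀ (String.ofList cur)).length < 8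
        · simp [hp, qpred]
        · simp [hp, qpred]
      · simp only [List.cons_append, List.foldl_cons, scanStep, if_neg hc]
        rw [ih (cur ++ [c]) out, sp1_ne c rest hc]
        congr 2
        cases h1 : sp1 rest with
        | nil => exact absurd h1 (sp1_ne_nil rest)
        | cons a t => simp

-- ===== VERDICT (by name: the statement is the Claim_ definition above) =====
theorem process_symp_il_spec : Claim_equal_process_symp_il := by
  intro rows hdom hpre
  unfold Spec_process_symp_il
  obtain ⟨h1, _⟩ := hpre
  rw [PySem.Dict.contains_eq_isSome_get?] at h1
  obtain ⟨s, hs⟩ := Option.isSome_iff_exists.mp h1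
  set d := ((PySem.Dict.mk rows).get? "disease_name").getD "" with hdd
  have hB : process_symp_il_alt rows
      = (List.foldl (scanStep d) ([], []) ((s ++ ".").toList)).1 := by
    unfold process_symp_il_alt
    simp only [hs]
    rfl
  have hdot : ("." : String).toList = ['.'] := by decide
  rw [A_reduced rows s hs, hB, show (s ++ ".").toList = s.toList ++ ['.'] by
    rw [String.toList_append, hdot]]
  rw [scan_go d s.toList [] []]
  have hid : (sp1 s.toList).modifyHead (fun x => [] ++ x) = sp1 s.toList := by
    simp only [List.nil_append]; exact modifyHead_id2 _
  rw [hid, List.nil_append]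
  have hsplit : ((PySem.Str.split? s ".").getD []) = (sp1 s.toList).map String.ofList := by
    simp only [PySem.Str.split?, PySem.Chars.split?, hdot]
    simp [splitOn_dot]
  rw [hsplit, List.filter_map, List.map_map]
  congr 1
  · apply List.filter_congr
    intro u _
    by_cases hu : u = []
    · subst hu; simp [qpred]
    · have hne : String.ofList u ≠ "" := by
        simpa [← String.toList_eq_nil_iff, String.toList_ofList] using hu
      simp [qpred, bne_iff_ne, hne, hu]
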